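-- pv_equiv track=rewrite | github.com/kayfuku/leetcode-Python | recursion/subsets.py | subsets_NG
-- ===== SOURCE A (Python) =====
-- from typing import List
--
-- def subsets_NG(nums: List[int]) -> List[List[int]]:
--
--     def dfs(start=0):
--         if start == n:
--             return
--         sol = []
--         for i in range(start, n):
--             sol.append(nums[i])
--             ret.append(sol[:])
--         dfs(start + 1)
--
--     n = len(nums)
--     ret = []
--     dfs()
--     return ret
-- ===== SOURCE B (Python) =====
-- def subsets_NG(nums):
--     n = len(nums)
--     return [nums[s:e] for s in range(n) for e in range(s + 1, n + 1)]
-- ===== Notes on version B (the rewrite author's own statement) =====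
-- stated objective: simpler
-- what changed: Replaces the recursive inner dfs helper mutating shared sol/ret lists with a single flat list comprehension over start/end index pairs taking slices nums[s:e].
import Mathlib
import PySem

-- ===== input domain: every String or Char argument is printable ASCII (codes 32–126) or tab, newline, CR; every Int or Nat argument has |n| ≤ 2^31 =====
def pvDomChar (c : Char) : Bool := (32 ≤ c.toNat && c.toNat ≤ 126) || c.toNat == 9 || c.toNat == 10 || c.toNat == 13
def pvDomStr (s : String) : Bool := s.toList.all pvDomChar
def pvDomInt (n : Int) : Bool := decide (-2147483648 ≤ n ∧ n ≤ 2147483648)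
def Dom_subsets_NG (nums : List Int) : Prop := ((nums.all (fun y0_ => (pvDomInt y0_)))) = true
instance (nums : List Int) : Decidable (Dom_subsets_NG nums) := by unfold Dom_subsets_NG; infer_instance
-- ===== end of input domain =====

-- B replaces A's recursive dfs helper (which mutates shared sol/ret lists) with one
-- flat comprehension over (start, end) index pairs taking slices; same values, not faster.

-- ===== PORT A =====
-- inner 'for i in range(start, n)' loop of dfs: state is (sol, ret)
def pvDfsStep (nums : List Int) (p : List Int × List (List Int)) (i : Int) :
    List Int × List (List Int) :=
  let sol := p.1 ++ [PySem.List.pyGetD nums i 0]   -- sol.append(nums[i]); i always in range here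
  (sol, p.2 ++ [sol])

-- dfs(start); fuel = n - start at every call, so the 'start == n' guard is Python's
def pvDfsA (nums : List Int) (n : Int) (start : Int) (ret : List (List Int)) :
    Nat → List (List Int)
  | 0 => ret
  | fuel + 1 =>
    if start = n then ret
    else
      let st := (PySem.List.pyRange start n 1).foldl (pvDfsStep nums) ([], ret)
      pvDfsA nums n (start + 1) st.2 fuel

def subsets_NG (nums : List Int) : List (List Int) :=
  let n : Int := nums.length
  pvDfsA nums n 0 [] (nums.length + 1)

-- ===== PORT B =====
def subsets_NG_alt (nums : List Int) : List (List Int) :=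
  let n : Int := nums.length
  (PySem.List.pyRange 0 n 1).flatMap (fun s =>
    (PySem.List.pyRange (s + 1) (n + 1) 1).map (fun e =>
      PySem.List.slice nums (some s) (some e)))

-- ===== PRECONDITION & SPEC =====
def Spec_subsets_NG (nums : List Int) (out : List (List Int)) : Prop := out = subsets_NG_alt nums
instance (nums : List Int) (out : List (List Int)) : Decidable (Spec_subsets_NG nums out) := by unfold Spec_subsets_NG; infer_instance

-- ===== CLAIM (what is proved, stated in full; the proofs are below) =====
def Claim_equal_subsets_NG : Prop := ∀ (nums : List Int), Dom_subsets_NG nums → Spec_subsets_NG nums (subsets_NG nums)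

-- ===== LEMMAS AND PROOFS =====

-- slice splits off its first element
theorem pv_slice_cons (nums : List Int) (a e : Int) (h0 : 0 ≤ a)
    (ha : a.toNat < nums.length) (he : a + 1 ≤ e) :
    PySem.List.slice nums (some a) (some e) =
      nums[a.toNat] :: PySem.List.slice nums (some (a + 1)) (some e) := by
  rw [PySem.List.slice_toNat nums h0 (by omega), PySem.List.slice_toNat nums (by omega : (0:Int) ≤ a + 1) (by omega)]
  rw [List.drop_eq_getElem_cons ha]
  have h1 : (a + 1).toNat = a.toNat + 1 := by omega
  have h2 : e.toNat - a.toNat = (e.toNat - (a + 1).toNat) + 1 := by omega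
  rw [h1, h2, List.take_succ_cons, h1]

-- the inner for-loop builds ret ++ the row of slices starting at a (given sol = prefix so far)
theorem pv_inner (nums : List Int) (a : Nat) (sol : List Int) (ret : List (List Int))
    (ha : a ≤ nums.length) :
    ((PySem.List.pyRange (a : Int) (nums.length : Int) 1).foldl (pvDfsStep nums) (sol, ret)).2
      = ret ++ (PySem.List.pyRange ((a : Int) + 1) ((nums.length : Int) + 1) 1).map
          (fun e => sol ++ PySem.List.slice nums (some (a : Int)) (some e)) := by
  induction hfi : nums.length - a generalizing a sol ret with
  | zero =>
    have hae : a = nums.length := by omega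
    subst hae
    rw [PySem.List.pyRange_one_eq_nil (by omega), PySem.List.pyRange_one_eq_nil (by omega)]
    simp
  | succ k ih =>
    have hlt : a < nums.length := by omega
    rw [PySem.List.pyRange_one_cons (by exact_mod_cast hlt)]
    have hcast : ((a : Int) + 1) = ((a + 1 : Nat) : Int) := by push_cast; ring
    rw [List.foldl_cons]
    have hstep : pvDfsStep nums (sol, ret) (a : Int)
        = (sol ++ [nums[a]], ret ++ [sol ++ [nums[a]]]) := by
      simp [pvDfsStep, PySem.List.pyGetD_natCast, List.getD_eq_getElem?_getD,
        List.getElem?_eq_getElem hlt]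
    rw [hstep, hcast, ih (a + 1) _ _ (by omega) (by omega), ← hcast]
    -- right side: split off e = a + 1
    rw [PySem.List.pyRange_one_cons (a := (a : Int) + 1) (by omega)]
    rw [List.map_cons]
    have hfirst : PySem.List.slice nums (some (a : Int)) (some ((a : Int) + 1)) = [nums[a]] := by
      rw [pv_slice_cons nums (a : Int) ((a : Int) + 1) (by omega) (by simpa) (by omega)]
      rw [PySem.List.slice_toNat _ (by omega) (by omega)]
      simp
    have hrest : (PySem.List.pyRange ((a : Int) + 1 + 1) ((nums.length : Int) + 1) 1).map
          (fun e => (sol ++ [nums[a]]) ++ PySem.List.slice nums (some ((a : Int) + 1)) (some e))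
        = (PySem.List.pyRange ((a : Int) + 1 + 1) ((nums.length : Int) + 1) 1).map
          (fun e => sol ++ PySem.List.slice nums (some (a : Int)) (some e)) := by
      apply List.map_congr_left
      intro e he
      rw [PySem.List.mem_pyRange_one] at he
      rw [pv_slice_cons nums (a : Int) e (by omega) (by simpa) (by omega)]
      simp
    rw [hrest, hfirst]
    simp [List.append_assoc]

-- the recursion over start indices builds ret ++ all rows from start on
theorem pv_outer (nums : List Int) (s : Nat) (ret : List (List Int)) (fuel : Nat)
    (hs : s ≤ nums.length) (hf : nums.length - s ≤ fuel) :
    pvDfsA nums (nums.length : Int) (s : Int) ret fuel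
      = ret ++ (PySem.List.pyRange (s : Int) (nums.length : Int) 1).flatMap (fun t =>
          (PySem.List.pyRange (t + 1) ((nums.length : Int) + 1) 1).map (fun e =>
            PySem.List.slice nums (some t) (some e))) := by
  induction fuel generalizing s ret with
  | zero =>
    have hse : s = nums.length := by omega
    subst hse
    rw [PySem.List.pyRange_one_eq_nil (by omega)]
    simp [pvDfsA]
  | succ f ih =>
    by_cases hse : s = nums.length
    · subst hse
      rw [PySem.List.pyRange_one_eq_nil (by omega)]
      simp [pvDfsA]
    · have hlt : s < nums.length := by omega
      rw [pvDfsA]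
      rw [if_neg (by exact_mod_cast hse)]
      have hinner := pv_inner nums s [] ret hs
      simp only [hinner]
      have hcast : ((s : Int) + 1) = ((s + 1 : Nat) : Int) := by push_cast; ring
      rw [hcast, ih (s + 1) _ (by omega) (by omega)]
      rw [PySem.List.pyRange_one_cons (a := (s : Int)) (by exact_mod_cast hlt), List.flatMap_cons]
      rw [hcast]
      simp [List.append_assoc]

-- ===== VERDICT (by name: the statement is the Claim_ definition above) =====
theorem subsets_NG_spec : Claim_equal_subsets_NG := by
  intro nums _
  show subsets_NG nums = subsets_NG_alt nums
  unfold subsets_NG subsets_NG_alt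
  have h := pv_outer nums 0 [] (nums.length + 1) (by omega) (by omega)
  simpa using h
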